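-- pv_equiv track=rewrite | github.com/YuqiJin0013/EC504 | HW6/problem3_2.py | repeated_squaring
-- ===== SOURCE A (Python) =====
-- def repeated_squaring(initial_matrix):
--     num_vertices = len(initial_matrix)
--     d = [[[0 for _ in range(num_vertices)] for _ in range(num_vertices)] for _ in range(5)]
--
--     # Initialize D(0)
--     for i in range(num_vertices):
--         for j in range(num_vertices):
--             d[0][i][j] = initial_matrix[i][j]
--
--     # Calculate D(2)
--     for k in range(1, 3):
--         for i in range(num_vertices):
--             for j in range(num_vertices):
--                 d[k][i][j] = min(d[k - 1][i][j], d[k - 1][i][k - 1] + d[k - 1][k - 1][j])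
--
--     # Calculate D(4)
--     for k in range(3, 5):
--         for i in range(num_vertices):
--             for j in range(num_vertices):
--                 d[k][i][j] = min(d[k - 1][i][j], d[k - 1][i][k - 1] + d[k - 1][k - 1][j])
--
--     return d[2], d[4]
-- ===== SOURCE B (Python) =====
-- def repeated_squaring(initial_matrix):
--     # Top-down: evaluate the defining recurrence d(k,i,j) directly by naive
--     # recursion from the input matrix, instead of filling a bottom-up table.
--     a = initial_matrix
--     n = len(a)
--
--     def f(k, i, j):
--         if k == 0:
--             return a[i][j]
--         p = k - 1
--         return min(f(p, i, j), f(p, i, p) + f(p, p, j))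
--
--     d2 = [[f(2, i, j) for j in range(n)] for i in range(n)]
--     d4 = [[f(4, i, j) for j in range(n)] for i in range(n)]
--     return d2, d4
-- ===== Notes on version B (the rewrite author's own statement) =====
-- stated objective: alternative
-- what changed: Replaces A's bottom-up 5-layer DP tensor with a memo-free top-down recursion f(k,i,j)=min(f(k-1,i,j), f(k-1,i,k-1)+f(k-1,k-1,j)) evaluated straight from the input matrix, building only the two requested matrices.
import Mathlib
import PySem

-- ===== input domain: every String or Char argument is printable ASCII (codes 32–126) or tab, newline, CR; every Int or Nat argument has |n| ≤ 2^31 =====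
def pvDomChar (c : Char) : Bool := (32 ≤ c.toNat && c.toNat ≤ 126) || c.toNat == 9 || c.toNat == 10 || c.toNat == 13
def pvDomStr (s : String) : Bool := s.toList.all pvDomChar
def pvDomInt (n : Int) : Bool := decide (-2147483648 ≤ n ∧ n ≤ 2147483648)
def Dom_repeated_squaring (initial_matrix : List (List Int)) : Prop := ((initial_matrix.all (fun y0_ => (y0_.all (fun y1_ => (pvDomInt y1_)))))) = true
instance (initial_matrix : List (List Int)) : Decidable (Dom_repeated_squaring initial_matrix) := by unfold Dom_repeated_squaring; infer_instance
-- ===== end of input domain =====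

-- B evaluates the defining recurrence top-down by naive recursion from the input
-- matrix instead of filling A's bottom-up 5-layer table; equal return values on Pre_.
-- Indexing: under Pre_ every index A reads is in range, so List.getD is exact there;
-- outside Pre_ the Pythons raise IndexError.

-- ===== PORT A =====
-- d[0] initialised from initial_matrix
def pvD0 (a : List (List Int)) : List (List Int) :=
  (List.range a.length).map (fun i => (List.range a.length).map (fun j =>
    (a.getD i []).getD j 0))

-- one layer d[k][i][j] = min(d[k-1][i][j], d[k-1][i][k-1] + d[k-1][k-1][j])
def pvLayerA (n : Nat) (prev : List (List Int)) (k1 : Nat) : List (List Int) :=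
  (List.range n).map (fun i => (List.range n).map (fun j =>
    min ((prev.getD i []).getD j 0) ((prev.getD i []).getD k1 0 + (prev.getD k1 []).getD j 0)))

def repeated_squaring (initial_matrix : List (List Int)) : List (List Int) × List (List Int) :=
  let n := initial_matrix.length
  let d0 := pvD0 initial_matrix
  -- the two k-loops, each overwriting layer d[k] computed from d[k-1]
  let d := List.foldl (fun (ds : List (List (List Int))) (k : Nat) =>
    ds ++ [pvLayerA n (ds.getD (k - 1) []) (k - 1)]) [d0] ([1, 2] ++ [3, 4])
  (d.getD 2 [], d.getD 4 [])

-- ===== PORT B =====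
-- top-down recursion f(k,i,j): f(0,i,j)=a[i][j], f(k,i,j)=min(f(k-1,i,j), f(k-1,i,k-1)+f(k-1,k-1,j))
def pvF (a : List (List Int)) : Nat → Nat → Nat → Int
  | 0, i, j => (a.getD i []).getD j 0
  | Nat.succ p, i, j => min (pvF a p i j) (pvF a p i p + pvF a p p j)

def repeated_squaring_alt (initial_matrix : List (List Int)) : List (List Int) × List (List Int) :=
  let n := initial_matrix.length
  ((List.range n).map (fun i => (List.range n).map (fun j => pvF initial_matrix 2 i j)),
   (List.range n).map (fun i => (List.range n).map (fun j => pvF initial_matrix 4 i j)))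

-- ===== PRECONDITION & SPEC =====
-- Pre_: exactly where the Python A returns. For 1 ≤ n ≤ 3 the access d[k-1][i][k-1] (k-1 up to 3)
-- raises IndexError, and a row shorter than n makes initial_matrix[i][j] raise; n = 0 returns ([], []).
def Pre_repeated_squaring (initial_matrix : List (List Int)) : Prop :=
  initial_matrix = [] ∨
    (4 ≤ initial_matrix.length ∧
      ∀ row ∈ initial_matrix, initial_matrix.length ≤ row.length)
instance (initial_matrix : List (List Int)) : Decidable (Pre_repeated_squaring initial_matrix) := by
  unfold Pre_repeated_squaring; infer_instance

def pvWitness_repeated_squaring : List (List Int) :=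
  [[0, 1, 2, 3], [1, 0, 1, 2], [2, 1, 0, 1], [3, 2, 1, 0]]

def Spec_repeated_squaring (initial_matrix : List (List Int)) (out : List (List Int) × List (List Int)) : Prop := out = repeated_squaring_alt initial_matrix
instance (initial_matrix : List (List Int)) (out : List (List Int) × List (List Int)) : Decidable (Spec_repeated_squaring initial_matrix out) := by unfold Spec_repeated_squaring; infer_instance

-- ===== CLAIM (what is proved, stated in full; the proofs are below) =====
def Claim_equal_repeated_squaring : Prop := ∀ (initial_matrix : List (List Int)), Dom_repeated_squaring initial_matrix → Pre_repeated_squaring initial_matrix → Spec_repeated_squaring initial_matrix (repeated_squaring initial_matrix)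

-- ===== LEMMAS AND PROOFS =====

-- entry m i j, the (i,j) read both ports perform
def pvEntry (m : List (List Int)) (i j : Nat) : Int := (m.getD i []).getD j 0

lemma pvEntry_layer (n : Nat) (prev : List (List Int)) (p i j : Nat) (hi : i < n) (hj : j < n) :
    pvEntry (pvLayerA n prev p) i j
      = min (pvEntry prev i j) (pvEntry prev i p + pvEntry prev p j) := by
  simp [pvEntry, pvLayerA, List.getD, hi, hj]

-- the chain of layers A builds
def pvLayerN (a : List (List Int)) : Nat → List (List Int)
  | 0 => pvD0 a
  | Nat.succ k => pvLayerA a.length (pvLayerN a k) k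

lemma pvEntry_layerN (a : List (List Int)) :
    ∀ k, ∀ i j, i < a.length → j < a.length → k ≤ a.length →
      pvEntry (pvLayerN a k) i j = pvF a k i j := by
  intro k
  induction k with
  | zero =>
      intro i j hi hj _
      simp [pvLayerN, pvD0, pvEntry, pvF, List.getD, hi, hj]
  | succ p ih =>
      intro i j hi hj hk
      have hp : p < a.length := Nat.lt_of_lt_of_le (Nat.lt_succ_self p) hk
      have hk' : p ≤ a.length := Nat.le_of_lt hp
      rw [pvLayerN, pvEntry_layer _ _ _ _ _ hi hj,
        ih i j hi hj hk', ih i p hi hp hk', ih p j hp hj hk']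
      rfl

lemma pvLayerN_eq (a : List (List Int)) (k : Nat) (hk : k ≤ a.length) :
    pvLayerN a k
      = (List.range a.length).map (fun i => (List.range a.length).map (fun j => pvF a k i j)) := by
  cases k with
  | zero => rfl
  | succ p =>
      show pvLayerA a.length (pvLayerN a p) p = _
      unfold pvLayerA
      apply List.map_congr_left
      intro i hi
      apply List.map_congr_left
      intro j hj
      have hi := List.mem_range.mp hi
      have hj := List.mem_range.mp hj
      have hp : p < a.length := Nat.lt_of_lt_of_le (Nat.lt_succ_self p) hk
      have hk' : p ≤ a.length := Nat.le_of_lt hp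
      show min (pvEntry (pvLayerN a p) i j)
          (pvEntry (pvLayerN a p) i p + pvEntry (pvLayerN a p) p j) = _
      rw [pvEntry_layerN a p i j hi hj hk', pvEntry_layerN a p i p hi hp hk',
        pvEntry_layerN a p p j hp hj hk']
      rfl

-- A's foldl over the concrete k-list unfolded into the layer chain
lemma pvA_eq_layers (m : List (List Int)) :
    repeated_squaring m = (pvLayerN m 2, pvLayerN m 4) := by
  simp [repeated_squaring, List.foldl, List.getD, pvLayerN]

-- ===== VERDICT (by name: the statement is the Claim_ definition above) =====
theorem repeated_squaring_spec : Claim_equal_repeated_squaring := by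
  intro m _ hpre
  unfold Spec_repeated_squaring
  rw [pvA_eq_layers]
  rcases hpre with h | ⟨h4, _⟩
  · subst h; decide
  · unfold repeated_squaring_alt
    rw [pvLayerN_eq m 2 (by omega), pvLayerN_eq m 4 h4]
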